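-- pv_equiv track=rewrite | github.com/CarlAGNicholson/greening-the-spark | gts_lib/gts_maths.py | vnegative2DArray
-- ===== SOURCE A (Python) =====
-- import copy
--
-- def vnegative2DArray(array1):
--     '''Checks to see if any negative values in each column, returns list of booleans.'''
--     vnegative = copy.copy(array1[0])
--     for i in range(len(vnegative)):
--         vnegative[i] = False
--     for row in array1:
--         for i in range(len(row)):
--             if (row[i]) < 0:
--                 vnegative[i] = True
--     return vnegative
-- ===== SOURCE B (Python) =====
-- def vnegative2DArray(array1):
--     '''Checks to see if any negative values in each column, returns list of booleans.'''
--     return [any(row[j] < 0 for row in array1 if j < len(row))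
--             for j in range(len(array1[0]))]
-- ===== Notes on version B (the rewrite author's own statement) =====
-- stated objective: idiomatic
-- what changed: Row-major double loop mutating a pre-initialized boolean accumulator replaced by a column-major comprehension using short-circuiting any() per column; Pre_ excludes only the inputs where A raises IndexError (empty array, or a negative entry at a column index >= len(array1[0])).
import Mathlib
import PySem

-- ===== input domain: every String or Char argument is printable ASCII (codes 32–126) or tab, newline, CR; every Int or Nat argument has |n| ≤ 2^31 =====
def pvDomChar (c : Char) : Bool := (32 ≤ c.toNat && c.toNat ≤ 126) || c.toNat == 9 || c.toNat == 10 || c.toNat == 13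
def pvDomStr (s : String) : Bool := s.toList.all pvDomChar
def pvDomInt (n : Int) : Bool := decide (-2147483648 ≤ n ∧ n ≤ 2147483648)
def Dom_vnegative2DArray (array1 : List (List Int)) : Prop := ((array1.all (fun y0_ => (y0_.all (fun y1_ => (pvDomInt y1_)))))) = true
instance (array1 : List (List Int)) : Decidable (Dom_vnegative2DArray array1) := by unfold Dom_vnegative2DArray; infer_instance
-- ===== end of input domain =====

-- B replaces A's row-major mutation of a boolean accumulator by an idiomatic column-major any() comprehension.


-- ===== PORT A =====
-- inner loop: for i in range(len(row)): if row[i] < 0: vnegative[i] = True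
-- (Pre_ guarantees any index written is < len(vnegative); List.set is used for the write)
def vnegSetRow (v : List Bool) (row : List Int) : List Bool :=
  (List.range row.length).foldl (fun v i => if row.getD i 0 < 0 then v.set i true else v) v

-- copy.copy(array1[0]) followed by the first loop overwriting every slot with False:
-- in Lean the accumulator is typed List Bool, so the copy-then-overwrite is the map to false.
def vnegative2DArray (array1 : List (List Int)) : List Bool :=
  let vnegative := (array1.headD []).map (fun _ => false)
  array1.foldl vnegSetRow vnegative

-- ===== PORT B =====
-- [any(row[j] < 0 for row in array1 if j < len(row)) for j in range(len(array1[0]))]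
def vnegative2DArray_alt (array1 : List (List Int)) : List Bool :=
  (List.range (array1.headD []).length).map
    (fun j => array1.any (fun row => decide (j < row.length) && decide (row.getD j 0 < 0)))

-- ===== PRECONDITION & SPEC =====
-- Pre_ excludes exactly the inputs where Python A raises IndexError: the empty array,
-- and arrays with a negative entry at a column index ≥ len(array1[0]).
def Pre_vnegative2DArray (array1 : List (List Int)) : Prop :=
  array1 ≠ [] ∧ ∀ row ∈ array1, ∀ x ∈ row.drop (array1.headD []).length, 0 ≤ x
instance (array1 : List (List Int)) : Decidable (Pre_vnegative2DArray array1) := by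
  unfold Pre_vnegative2DArray; infer_instance

def pvWitness_vnegative2DArray : List (List Int) := [[1, -2], [-3, 4]]

def Spec_vnegative2DArray (array1 : List (List Int)) (out : List Bool) : Prop := out = vnegative2DArray_alt array1
instance (array1 : List (List Int)) (out : List Bool) : Decidable (Spec_vnegative2DArray array1 out) := by unfold Spec_vnegative2DArray; infer_instance

-- ===== CLAIM (what is proved, stated in full; the proofs are below) =====
def Claim_equal_vnegative2DArray : Prop := ∀ (array1 : List (List Int)), Dom_vnegative2DArray array1 → Pre_vnegative2DArray array1 → Spec_vnegative2DArray array1 (vnegative2DArray array1)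

-- ===== LEMMAS AND PROOFS =====

theorem foldl_set_length (row : List Int) (l : List Nat) (v : List Bool) :
    (l.foldl (fun v i => if row.getD i 0 < 0 then v.set i true else v) v).length = v.length := by
  induction l generalizing v with
  | nil => rfl
  | cons i is ih =>
    simp only [List.foldl_cons]
    rw [ih]
    split <;> simp

theorem vnegSetRow_length (v : List Bool) (row : List Int) :
    (vnegSetRow v row).length = v.length := foldl_set_length row _ v

theorem range_foldl_getD (row : List Int) (m : Nat) (v : List Bool) (j : Nat) (hj : j < v.length) :
    ((List.range m).foldl (fun v i => if row.getD i 0 < 0 then v.set i true else v) v).getD j false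
      = (v.getD j false || (decide (j < m) && decide (row.getD j 0 < 0))) := by
  induction m generalizing v with
  | zero => simp
  | succ m ih =>
    rw [List.range_succ, List.foldl_append, List.foldl_cons, List.foldl_nil]
    by_cases hlt : row.getD m 0 < 0
    · simp only [hlt, if_pos]
      have hlen := foldl_set_length row (List.range m) v
      by_cases hjm : j = m
      · subst hjm
        rw [decide_eq_true hlt, decide_eq_true (Nat.lt_succ_self j), Bool.true_and, Bool.or_true]
        rw [List.getD_eq_getElem?_getD, List.getElem?_set_self (by omega), Option.getD_some]
      · rw [List.getD_eq_getElem?_getD, List.getElem?_set_ne (by omega),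
            ← List.getD_eq_getElem?_getD, ih v hj]
        have he : decide (j < m + 1) = decide (j < m) := by
          rw [decide_eq_decide]; omega
        rw [he]
    · simp only [hlt, if_false]
      rw [ih v hj]
      by_cases hjm : j = m
      · subst hjm
        rw [decide_eq_false hlt, Bool.and_false, Bool.and_false]
      · have he : decide (j < m + 1) = decide (j < m) := by
          rw [decide_eq_decide]; omega
        rw [he]

theorem foldl_rows_getD (rows : List (List Int)) (v : List Bool) (j : Nat) (hj : j < v.length) :
    (rows.foldl vnegSetRow v).getD j false
      = (v.getD j false || rows.any (fun row => decide (j < row.length) && decide (row.getD j 0 < 0))) := by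
  induction rows generalizing v with
  | nil => simp
  | cons r rs ih =>
    simp only [List.foldl_cons, List.any_cons]
    rw [ih (vnegSetRow v r) (by rw [vnegSetRow_length]; exact hj)]
    unfold vnegSetRow
    rw [range_foldl_getD r r.length v j hj]
    simp [Bool.or_assoc]

theorem foldl_rows_length (rows : List (List Int)) (v : List Bool) :
    (rows.foldl vnegSetRow v).length = v.length := by
  induction rows generalizing v with
  | nil => rfl
  | cons r rs ih => simp only [List.foldl_cons]; rw [ih, vnegSetRow_length]

-- ===== VERDICT (by name: the statement is the Claim_ definition above) =====
theorem vnegative2DArray_spec : Claim_equal_vnegative2DArray := by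
  intro array1 _ _
  unfold Spec_vnegative2DArray vnegative2DArray vnegative2DArray_alt
  apply List.ext_getElem
  · rw [foldl_rows_length]; simp
  · intro i h1 h2
    have hv : i < ((array1.headD []).map (fun _ => false)).length := by
      rw [List.length_map]; simpa using h2
    rw [← List.getD_eq_getElem _ false h1, ← List.getD_eq_getElem _ false h2]
    rw [foldl_rows_getD _ _ _ hv]
    have hfalse : ((array1.headD []).map (fun _ => false)).getD i false = false := by
      rw [List.getD_eq_getElem?_getD, List.getElem?_map]
      cases (array1.headD [])[i]? <;> rfl
    rw [hfalse, Bool.false_or]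
    simp only [List.getD_eq_getElem?_getD, List.getElem?_map]
    rw [List.getElem?_range (by simpa using h2)]
    simp
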